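-- pv_equiv track=rewrite | github.com/lokashrinav/lc | 3616 Number of Student Replacements/3616number-of-student-replacements.py | totalReplacements
-- ===== SOURCE A (Python) =====
-- from typing import List
--
-- def totalReplacements(ranks: List[int]) -> int:
--
--     curr = ranks[0]
--     count = 0
--
--     for i in range(1, len(ranks)):
--         if ranks[i] < curr:
--             curr = ranks[i]
--             count += 1
--
--     return count
-- ===== SOURCE B (Python) =====
-- def totalReplacements(ranks):
--     # Build the running-minimum table, then count adjacent strict decreases.
--     mins = ranks[:1]
--     for r in ranks[1:]:
--         mins.append(min(mins[-1], r))
--     return sum(1 for a, b in zip(mins, mins[1:]) if b < a)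
-- ===== Notes on version B (the rewrite author's own statement) =====
-- stated objective: alternative
-- what changed: B first materialises the running-minimum prefix table and then counts adjacent strict decreases in it, instead of A's single stateful index loop updating curr/count.
-- crash fix: On empty ranks A raises IndexError at the initial element access; B naturally returns zero (empty table, empty sum). — e.g. on totalReplacements([]): A raises IndexError, B returns 0
import Mathlib
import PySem

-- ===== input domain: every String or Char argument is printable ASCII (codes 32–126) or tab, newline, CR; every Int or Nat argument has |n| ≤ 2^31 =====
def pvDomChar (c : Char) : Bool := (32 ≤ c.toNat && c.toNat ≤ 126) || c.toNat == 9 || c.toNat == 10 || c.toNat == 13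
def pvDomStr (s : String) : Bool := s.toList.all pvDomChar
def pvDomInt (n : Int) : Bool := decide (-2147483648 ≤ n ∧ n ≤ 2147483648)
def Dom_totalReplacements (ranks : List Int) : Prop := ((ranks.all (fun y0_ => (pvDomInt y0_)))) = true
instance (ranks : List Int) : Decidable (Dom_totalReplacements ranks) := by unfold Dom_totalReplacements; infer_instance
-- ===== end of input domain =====

-- B builds the running-minimum table then counts adjacent strict decreases (alternative decomposition of A's stateful loop); on empty input A raises IndexError, B returns zero.


-- ===== PORT A =====
def totalReplacements (ranks : List Int) : Int :=
  -- curr = the first element; IndexError on the empty list is excluded by Pre_ (the pyGetD default is never read there)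
  ((PySem.List.pyRange 1 (ranks.length : Int) 1).foldl
      (fun (s : Int × Int) i =>
        -- r = ranks[i]; the index is always in range inside this loop
        if PySem.List.pyGetD ranks i 0 < s.1 then (PySem.List.pyGetD ranks i 0, s.2 + 1) else s)
      (PySem.List.pyGetD ranks 0 0, 0)).2

-- ===== PORT B =====
-- sum(1 for a, b in zip(mins, mins[1:]) if b < a)
def zipDecSum (l : List Int) : Int :=
  ((l.zip l.tail).map (fun p => if p.2 < p.1 then (1 : Int) else 0)).sum

def totalReplacements_alt (ranks : List Int) : Int :=
  zipDecSum ((PySem.List.slice ranks (some 1) none).foldl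
      (fun mins r => mins ++ [min (mins.getLastD 0) r])  -- mins.append(min(mins[-1], r))
      (PySem.List.slice ranks none (some 1)))            -- mins = ranks[:1]

-- ===== PRECONDITION & SPEC =====
-- Pre_ excludes only the empty list, on which A raises IndexError reading the first element.
def Pre_totalReplacements (ranks : List Int) : Prop := ranks ≠ []
instance (ranks : List Int) : Decidable (Pre_totalReplacements ranks) := by unfold Pre_totalReplacements; infer_instance
def pvWitness_totalReplacements : List Int := [3, 1, 2]

-- On empty ranks A raises IndexError at the initial element access; B naturally returns zero.
def Raises_totalReplacements (ranks : List Int) : Prop := ranks = []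
instance (ranks : List Int) : Decidable (Raises_totalReplacements ranks) := by unfold Raises_totalReplacements; infer_instance
def pvRaiseWitness_totalReplacements : List Int := []
def pvRaiseWitnessOut_totalReplacements : Int := 0

def Spec_totalReplacements (ranks : List Int) (out : Int) : Prop := out = totalReplacements_alt ranks
instance (ranks : List Int) (out : Int) : Decidable (Spec_totalReplacements ranks out) := by unfold Spec_totalReplacements; infer_instance

-- ===== CLAIM (what is proved, stated in full; the proofs are below) =====
def Claim_equal_totalReplacements : Prop := ∀ (ranks : List Int), Dom_totalReplacements ranks → Pre_totalReplacements ranks → Spec_totalReplacements ranks (totalReplacements ranks)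
def Claim_raises_totalReplacements : Prop := (∀ (ranks : List Int), Dom_totalReplacements ranks → Raises_totalReplacements ranks → ¬ Pre_totalReplacements ranks) ∧ (Dom_totalReplacements (pvRaiseWitness_totalReplacements) ∧ Raises_totalReplacements (pvRaiseWitness_totalReplacements) ∧ totalReplacements_alt (pvRaiseWitness_totalReplacements) = pvRaiseWitnessOut_totalReplacements)

-- ===== LEMMAS AND PROOFS =====

/-- The running-minimum sequence starting from `c`, head is always `c`. -/
def scanMin (c : Int) : List Int → List Int
  | [] => [c]
  | r :: t => c :: scanMin (min c r) t

lemma scanMin_head (c : Int) (t : List Int) : ∃ l, scanMin c t = c :: l := by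
  cases t <;> simp [scanMin]

lemma build_eq (t : List Int) : ∀ (p : List Int) (c : Int),
    t.foldl (fun mins r => mins ++ [min (mins.getLastD 0) r]) (p ++ [c]) = p ++ scanMin c t := by
  induction t with
  | nil => intro p c; simp [scanMin]
  | cons r t ih =>
    intro p c
    have hl : (p ++ [c]).getLastD 0 = c := by
      simp
    simp only [List.foldl_cons, hl, scanMin]
    have := ih (p ++ [c]) (min c r)
    simpa using this

lemma zipDecSum_cons (c : Int) (m : Int) (t : List Int) :
    zipDecSum (c :: scanMin m t) = (if m < c then 1 else 0) + zipDecSum (scanMin m t) := by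
  obtain ⟨l, hl⟩ := scanMin_head m t
  rw [hl]
  simp [zipDecSum]

lemma key (t : List Int) : ∀ (c count : Int),
    (t.foldl (fun (s : Int × Int) r => if r < s.1 then (r, s.2 + 1) else s) (c, count)).2
      = count + zipDecSum (scanMin c t) := by
  induction t with
  | nil => intro c count; simp [scanMin, zipDecSum]
  | cons r t ih =>
    intro c count
    simp only [List.foldl_cons, scanMin, zipDecSum_cons]
    by_cases h : r < c
    · have hmin : min c r = r := by omega
      simp [h, hmin, ih]
      ring
    · have hmin : min c r = c := by omega
      have h' : ¬ (min c r < c) := by omega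
      simp [h, hmin, ih]

-- ===== VERDICT (by name: the statement is the Claim_ definition above) =====
theorem totalReplacements_spec : Claim_equal_totalReplacements := by
  intro ranks _ hpre
  obtain ⟨c, t, rfl⟩ : ∃ c t, ranks = c :: t := by
    cases ranks with
    | nil => exact absurd rfl hpre
    | cons c t => exact ⟨c, t, rfl⟩
  unfold Spec_totalReplacements totalReplacements totalReplacements_alt
  rw [PySem.List.slice_to (c :: t) (b := 1) (by omega),
      PySem.List.slice_from (c :: t) (a := 1) (by omega),
      PySem.List.foldl_pyRange_pyGetD' (c :: t) 0
        (fun (s : Int × Int) r => if r < s.1 then (r, s.2 + 1) else s) _ (a := 1) (by omega)]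
  have hc : PySem.List.pyGetD (c :: t) 0 0 = c := by simp [pysem]
  rw [hc]
  have hb := build_eq ((c :: t).drop (1 : Int).toNat) ([] : List Int) c
  simp only [List.nil_append] at hb
  simp only [Int.toNat_one, List.drop_one, List.tail_cons, List.take_succ_cons, List.take_zero] at hb ⊢
  rw [hb, key t c 0]
  simp

@[simp] theorem totalReplacements_raises : Claim_raises_totalReplacements := by
  unfold Claim_raises_totalReplacements
  exact ⟨by intro ranks _ h; simp [Raises_totalReplacements] at h; simp [Pre_totalReplacements, h], by decide⟩
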